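-- pv_equiv track=rewrite | github.com/Dlfmiee/CP125-Class-Repo | labs/lab06/exercise1/exercise1.py | get_legit_power_users
-- ===== SOURCE A (Python) =====
-- def get_legit_power_users(log_data, bot_ids, threshold):
--
--     user_actions = {}
--
--     for entry in log_data:
--         timestamp = entry[0]
--         user_id = entry[1]
--         action_type = entry[2]
--
--         if user_id in bot_ids:
--             continue
--
--         if user_id not in user_actions:
--             user_actions[user_id] = []
--
--         if action_type not in user_actions[user_id]:
--             user_actions[user_id].append(action_type)
--
--     power_users = []
--     for user_id in user_actions:
--         if len(user_actions[user_id]) > threshold: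
--             power_users.append(user_id)
--
--     power_users.sort()
--     return power_users
-- ===== SOURCE B (Python) =====
-- def get_legit_power_users(log_data, bot_ids, threshold):
--     users = sorted({e[1] for e in log_data if e[1] not in bot_ids})
--     return [u for u in users
--             if len({e[2] for e in log_data if e[1] == u}) > threshold]
-- ===== Notes on version B (the rewrite author's own statement) =====
-- stated objective: simpler
-- what changed: A's single pass building a dict of per-user distinct-action lists (with list membership tests) is replaced by two comprehensions: a sorted set of non-bot user ids, then a per-user distinct-action count via a set over a rescan of the log.
import Mathlib
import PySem

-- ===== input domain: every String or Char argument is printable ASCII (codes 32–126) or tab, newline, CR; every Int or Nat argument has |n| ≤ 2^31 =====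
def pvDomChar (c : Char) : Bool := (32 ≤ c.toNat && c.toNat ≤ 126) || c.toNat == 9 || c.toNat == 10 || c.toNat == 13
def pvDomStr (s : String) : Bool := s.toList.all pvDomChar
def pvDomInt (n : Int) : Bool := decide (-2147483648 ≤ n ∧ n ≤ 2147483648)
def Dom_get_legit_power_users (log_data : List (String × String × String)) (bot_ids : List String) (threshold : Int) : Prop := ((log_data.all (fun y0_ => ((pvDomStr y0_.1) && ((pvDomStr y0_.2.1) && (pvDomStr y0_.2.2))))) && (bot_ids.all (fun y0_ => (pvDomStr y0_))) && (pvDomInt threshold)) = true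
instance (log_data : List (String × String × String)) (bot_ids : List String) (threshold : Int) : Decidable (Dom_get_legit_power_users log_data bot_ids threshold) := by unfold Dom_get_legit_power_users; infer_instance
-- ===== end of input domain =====

-- B replaces A's one-pass dict of per-user distinct-action lists by a sorted distinct-user list
-- with a per-user distinct-action count (objective: simpler, no speed claim).

-- ===== PORT A =====
-- one dict-building pass, then a filtering pass over the keys, then sort
def get_legit_power_users (log_data : List (String × String × String)) (bot_ids : List String) (threshold : Int) : List String :=
  let user_actions : PySem.Dict String (List String) :=
    log_data.foldl (fun d entry =>
      let user_id := entry.2.1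
      let action_type := entry.2.2
      if user_id ∈ bot_ids then d
      else
        let d2 := if d.contains user_id then d else d.insert user_id []
        if action_type ∈ d2.getD user_id [] then d2
        else d2.modify user_id [] (fun l => l ++ [action_type])) PySem.Dict.empty
  -- Python looks up user_actions[user_id] while iterating the keys, so the key is present:
  -- getD with default [] computes the same value on every reachable lookup.
  let power_users :=
    user_actions.keys.foldl (fun acc user_id =>
      if threshold < ((user_actions.getD user_id []).length : Int) then acc ++ [user_id] else acc) []
  PySem.List.sorted power_users (fun x => x) false

-- ===== PORT B =====
-- {e[1] for e in log_data if e[1] not in bot_ids}, sorted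
def pvUsers (log_data : List (String × String × String)) (bot_ids : List String) : List String :=
  PySem.Set.ofList ((log_data.filter (fun e => !(e.2.1 ∈ bot_ids))).map (fun e => e.2.1))

-- {e[2] for e in log_data if e[1] == u}
def pvDistinctActions (log_data : List (String × String × String)) (u : String) : List String :=
  PySem.Set.ofList ((log_data.filter (fun e => e.2.1 == u)).map (fun e => e.2.2))

def get_legit_power_users_alt (log_data : List (String × String × String)) (bot_ids : List String) (threshold : Int) : List String :=
  (PySem.List.sorted (pvUsers log_data bot_ids) (fun x => x) false).filter
    (fun u => threshold < ((pvDistinctActions log_data u).length : Int))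

-- ===== PRECONDITION & SPEC =====
def Spec_get_legit_power_users (log_data : List (String × String × String)) (bot_ids : List String) (threshold : Int) (out : List String) : Prop := out = get_legit_power_users_alt log_data bot_ids threshold
instance (log_data : List (String × String × String)) (bot_ids : List String) (threshold : Int) (out : List String) : Decidable (Spec_get_legit_power_users log_data bot_ids threshold out) := by unfold Spec_get_legit_power_users; infer_instance

-- ===== CLAIM (what is proved, stated in full; the proofs are below) =====
def Claim_equal_get_legit_power_users : Prop := ∀ (log_data : List (String × String × String)) (bot_ids : List String) (threshold : Int), Dom_get_legit_power_users log_data bot_ids threshold → Spec_get_legit_power_users log_data bot_ids threshold (get_legit_power_users log_data bot_ids threshold)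

-- ===== LEMMAS AND PROOFS =====

-- A's dict-building step and its fold, named for the proofs
def pvStepA (bot_ids : List String) (d : PySem.Dict String (List String)) (entry : String × String × String) : PySem.Dict String (List String) :=
  let user_id := entry.2.1
  let action_type := entry.2.2
  if user_id ∈ bot_ids then d
  else
    let d2 := if d.contains user_id then d else d.insert user_id []
    if action_type ∈ d2.getD user_id [] then d2
    else d2.modify user_id [] (fun l => l ++ [action_type])

def pvDictA (log_data : List (String × String × String)) (bot_ids : List String) : PySem.Dict String (List String) :=
  log_data.foldl (pvStepA bot_ids) PySem.Dict.empty

lemma pvDictA_append (l : List (String × String × String)) (e : String × String × String) (b : List String) :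
    pvDictA (l ++ [e]) b = pvStepA b (pvDictA l b) e := by
  simp [pvDictA, List.foldl_append]

lemma pvOfList_append_singleton {α : Type} [BEq α] (l : List α) (x : α) :
    PySem.Set.ofList (l ++ [x]) = PySem.Set.add (PySem.Set.ofList l) x := by
  rw [PySem.Set.ofList_eq_foldl, List.foldl_append, ← PySem.Set.ofList_eq_foldl]
  rfl

lemma pvUsers_append (l : List (String × String × String)) (e : String × String × String) (b : List String) (hb : e.2.1 ∉ b) :
    pvUsers (l ++ [e]) b = PySem.Set.add (pvUsers l b) e.2.1 := by
  simp [pvUsers, List.filter_append, hb, pvOfList_append_singleton]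

lemma pvDictA_keys (l : List (String × String × String)) (b : List String) :
    (pvDictA l b).keys = pvUsers l b := by
  induction l using List.reverseRecOn with
  | nil => simp [pvDictA, pvUsers, PySem.Set.ofList]
  | append_singleton l e ih =>
    rw [pvDictA_append]
    unfold pvStepA
    by_cases hb : e.2.1 ∈ b
    · simp only [hb, if_pos, ih, pvUsers, List.filter_append]
      simp [hb]
    · rw [pvUsers_append l e b hb]
      simp only [hb, if_false]
      by_cases hc : (pvDictA l b).contains e.2.1
      · have hmem : e.2.1 ∈ pvUsers l b := by
          rw [← ih]; exact (PySem.Dict.contains_iff_mem_keys _ _).mp hc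
        have hadd : PySem.Set.add (pvUsers l b) e.2.1 = pvUsers l b := by
          simp [PySem.Set.add, PySem.Set.contains, hmem]
        rw [hadd, if_pos hc]
        split
        · exact ih
        · rw [PySem.Dict.keys_modify, PySem.Dict.keys_insert_of_contains _ _ hc, ih]
      · have hmem : e.2.1 ∉ pvUsers l b := by
          rw [← ih]; exact fun h => hc ((PySem.Dict.contains_iff_mem_keys _ _).mpr h)
        have hadd : PySem.Set.add (pvUsers l b) e.2.1 = pvUsers l b ++ [e.2.1] := by
          simp [PySem.Set.add, PySem.Set.contains, hmem]
        rw [hadd, if_neg hc]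
        split
        · rw [PySem.Dict.keys_insert_of_not_contains _ _ (by simpa using hc), ih]
        · rw [PySem.Dict.keys_modify,
            PySem.Dict.keys_insert_of_contains _ _ (PySem.Dict.contains_insert_self _ _ _),
            PySem.Dict.keys_insert_of_not_contains _ _ (by simpa using hc), ih]

lemma pvActs_append (l : List (String × String × String)) (e : String × String × String) (u : String) :
    pvDistinctActions (l ++ [e]) u =
      if e.2.1 = u then PySem.Set.add (pvDistinctActions l u) e.2.2 else pvDistinctActions l u := by
  by_cases h : e.2.1 = u
  · simp [pvDistinctActions, List.filter_append, h, pvOfList_append_singleton]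
  · simp [pvDistinctActions, List.filter_append, h]

lemma pvDictA_getD (l : List (String × String × String)) (b : List String) (u : String) (hu : u ∉ b) :
    (pvDictA l b).getD u [] = pvDistinctActions l u := by
  induction l using List.reverseRecOn with
  | nil => simp [pvDictA, pvDistinctActions, PySem.Set.ofList, PySem.Dict.getD_empty]
  | append_singleton l e ih =>
    rw [pvDictA_append, pvActs_append]
    unfold pvStepA
    by_cases hb : e.2.1 ∈ b
    · have hne : e.2.1 ≠ u := fun h => hu (h ▸ hb)
      simp [hb, hne, ih]
    · simp only [hb, if_false]
      by_cases heu : e.2.1 = u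
      · subst heu
        have hd2 : (if (pvDictA l b).contains e.2.1 then pvDictA l b
            else (pvDictA l b).insert e.2.1 []).getD e.2.1 [] = (pvDictA l b).getD e.2.1 [] := by
          by_cases hc : (pvDictA l b).contains e.2.1
          · rw [if_pos hc]
          · rw [if_neg hc, PySem.Dict.getD_insert, if_pos rfl,
              PySem.Dict.getD_of_not_contains _ _ (by simpa using hc)]
        rw [if_pos rfl]
        by_cases ha : e.2.2 ∈ (pvDictA l b).getD e.2.1 []
        · rw [if_pos (hd2 ▸ ha), hd2, ih]
          have : e.2.2 ∈ pvDistinctActions l e.2.1 := ih ▸ ha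
          simp [PySem.Set.add, PySem.Set.contains, this]
        · rw [if_neg (fun h => ha (hd2 ▸ h)), PySem.Dict.getD_modify, if_pos rfl, hd2, ih]
          have : e.2.2 ∉ pvDistinctActions l e.2.1 := fun h => ha (ih ▸ h)
          simp [PySem.Set.add, PySem.Set.contains, this]
      · rw [if_neg heu]
        have step_ne : ∀ d2 : PySem.Dict String (List String),
            d2.getD u [] = (pvDictA l b).getD u [] →
            (if e.2.2 ∈ d2.getD e.2.1 [] then d2
              else d2.modify e.2.1 [] (fun l => l ++ [e.2.2])).getD u [] = (pvDictA l b).getD u [] := by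
          intro d2 h2
          split
          · exact h2
          · rw [PySem.Dict.getD_modify, if_neg (show ¬(u = e.2.1) from fun h => heu h.symm), h2]
        rw [step_ne _ ?_, ih]
        by_cases hc : (pvDictA l b).contains e.2.1
        · rw [if_pos hc]
        · rw [if_neg hc, PySem.Dict.getD_insert, if_neg (show ¬(u = e.2.1) from fun h => heu h.symm)]

lemma pvUsers_not_bot (l : List (String × String × String)) (b : List String) (u : String)
    (hu : u ∈ pvUsers l b) : u ∉ b := by
  rw [pvUsers, PySem.Set.mem_ofList] at hu
  obtain ⟨e, he, rfl⟩ := List.mem_map.mp hu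
  simpa using (List.mem_filter.mp he).2

-- ===== VERDICT (by name: the statement is the Claim_ definition above) =====
theorem get_legit_power_users_spec : Claim_equal_get_legit_power_users := by
  intro l b t _
  unfold Spec_get_legit_power_users
  have hA : get_legit_power_users l b t = PySem.List.sorted
      ((pvDictA l b).keys.foldl (fun acc u =>
        if t < (((pvDictA l b).getD u []).length : Int) then acc ++ [u] else acc) [])
      (fun x => x) false := rfl
  have hfold : (pvDictA l b).keys.foldl (fun acc u =>
        if t < (((pvDictA l b).getD u []).length : Int) then acc ++ [u] else acc) [] =
      (pvDictA l b).keys.filter (fun u => decide (t < (((pvDictA l b).getD u []).length : Int))) := by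
    have := PySem.List.foldl_append_if
      (fun u => decide (t < (((pvDictA l b).getD u []).length : Int))) id (pvDictA l b).keys []
    simpa using this
  rw [hA, hfold, pvDictA_keys,
    List.filter_congr (fun u hu => by rw [pvDictA_getD l b u (pvUsers_not_bot l b u hu)])]
  unfold get_legit_power_users_alt
  apply PySem.List.sorted_eq_of_perm_of_pairwise_lt
  · exact (PySem.List.sorted_perm _ _ _).filter _
  · exact List.Pairwise.filter _
      (by rw [pvUsers]; exact PySem.List.sorted_ofList_pairwise_lt _)
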